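-- pv_equiv track=rewrite | github.com/pilifjed/simplification | simplifier.py | sort_by_ones
-- ===== SOURCE A (Python) =====
-- def sort_by_ones(implicants):
--     onescount = 0
--     end = len(implicants)
--     state = 0
--     outdict = {}
--     while state < end:
--         outdict[onescount] = [x for x in implicants if sum(x[1].values()) == onescount]
--         state += len(outdict[onescount])
--         onescount += 1
--     return outdict
-- ===== SOURCE B (Python) =====
-- def sort_by_ones(implicants):
--     sums = [sum(x[1].values()) for x in implicants]
--     m = max(sums) + 1 if sums else 0
--     buckets = {k: [] for k in range(m)}
--     for s, x in zip(sums, implicants):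
--         buckets[s].append(x)
--     return buckets
-- ===== Notes on version B (the rewrite author's own statement) =====
-- stated objective: faster
-- what changed: Replaced the while-loop that re-scans the whole implicant list once per ones-count with a single bucketing pass over precomputed sums into a dict preallocated with keys 0..max.
import Mathlib
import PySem

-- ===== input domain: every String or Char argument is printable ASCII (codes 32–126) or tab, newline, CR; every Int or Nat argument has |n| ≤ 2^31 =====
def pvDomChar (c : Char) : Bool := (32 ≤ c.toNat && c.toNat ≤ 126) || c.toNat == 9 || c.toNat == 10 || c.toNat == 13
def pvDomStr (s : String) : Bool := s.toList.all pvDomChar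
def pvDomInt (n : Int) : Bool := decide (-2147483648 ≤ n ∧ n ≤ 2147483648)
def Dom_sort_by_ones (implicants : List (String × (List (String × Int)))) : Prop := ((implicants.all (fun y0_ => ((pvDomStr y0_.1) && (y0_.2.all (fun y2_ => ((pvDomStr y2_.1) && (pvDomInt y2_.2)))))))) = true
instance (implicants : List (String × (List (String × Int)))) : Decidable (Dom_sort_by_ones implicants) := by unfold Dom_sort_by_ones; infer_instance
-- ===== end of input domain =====

-- B replaces A's repeated full-list scan per ones-count by one bucketing pass over precomputed
-- sums into a dict preallocated with keys 0..max (asymptotically faster, O(n+m) vs O(n*m)).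


-- ===== PORT A =====
-- shared helper: sum(x[1].values()) (both Pythons compute exactly this)
def pvSum (x : String × (List (String × Int))) : Int :=
  ((PySem.Dict.ofList x.2).values).sum

-- the while loop of A; fuel is only a totality guard (under Pre_ it never runs out)
def pvLoopA (implicants : List (String × (List (String × Int)))) (endn : Int)
    (fuel : Nat) (onescount state : Int)
    (outdict : PySem.Dict Int (List (String × (List (String × Int))))) :
    PySem.Dict Int (List (String × (List (String × Int)))) :=
  if state < endn then
    match fuel with
    | 0 => outdict
    | fuel' + 1 =>
      let bucket := implicants.filter (fun x => pvSum x == onescount)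
      pvLoopA implicants endn fuel' (onescount + 1) (state + PySem.List.len bucket)
        (outdict.insert onescount bucket)
  else outdict

def sort_by_ones (implicants : List (String × (List (String × Int)))) : List (Int × List (String × (List (String × Int)))) :=
  (pvLoopA implicants (PySem.List.len implicants)
    (((implicants.map pvSum).foldl max 0).toNat + 1) 0 0 PySem.Dict.empty).items

-- ===== PORT B =====

def sort_by_ones_alt (implicants : List (String × (List (String × Int)))) : List (Int × List (String × (List (String × Int)))) :=
  let sums := implicants.map pvSum
  let m : Int := match PySem.List.max? sums (fun y => y) with
    | some v => v + 1
    | none => 0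
  let buckets0 := (PySem.List.pyRange 0 m 1).foldl
    (fun d k => d.insert k ([] : List (String × (List (String × Int))))) PySem.Dict.empty
  -- buckets[s].append(x): key s is present under Pre_; modify with default [] is exact there
  let buckets := (sums.zip implicants).foldl (fun d p => d.modify p.1 [] (· ++ [p.2])) buckets0
  buckets.items

-- ===== PRECONDITION & SPEC =====
-- Pre_ excludes implicants whose values sum to a negative number: there A's while loop never
-- terminates (state can never reach end), so A returns on exactly the inputs admitted here.
def Pre_sort_by_ones (implicants : List (String × (List (String × Int)))) : Prop :=
  ∀ x ∈ implicants, 0 ≤ pvSum x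
instance (implicants : List (String × (List (String × Int)))) : Decidable (Pre_sort_by_ones implicants) := by unfold Pre_sort_by_ones; infer_instance

def pvWitness_sort_by_ones : (List (String × (List (String × Int)))) :=
  [("ab", [("x", 1), ("y", 1)]), ("cd", [("x", 0)])]

def Spec_sort_by_ones (implicants : List (String × (List (String × Int)))) (out : List (Int × List (String × (List (String × Int))))) : Prop := out = sort_by_ones_alt implicants
instance (implicants : List (String × (List (String × Int)))) (out : List (Int × List (String × (List (String × Int))))) : Decidable (Spec_sort_by_ones implicants out) := by unfold Spec_sort_by_ones; infer_instance

-- ===== CLAIM (what is proved, stated in full; the proofs are below) =====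
def Claim_equal_sort_by_ones : Prop := ∀ (implicants : List (String × (List (String × Int)))), Dom_sort_by_ones implicants → Pre_sort_by_ones implicants → Spec_sort_by_ones implicants (sort_by_ones implicants)

-- ===== LEMMAS AND PROOFS =====

-- the bound 1 + max of the sums (0 for the empty list), shared by both analyses
def pvM (implicants : List (String × (List (String × Int)))) : Int :=
  match PySem.List.max? (implicants.map pvSum) (fun y => y) with
  | some v => v + 1
  | none => 0

theorem pvSum_lt_pvM {implicants : List (String × (List (String × Int)))}
    {x : String × (List (String × Int))} (hx : x ∈ implicants) :
    pvSum x < pvM implicants := by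
  unfold pvM
  cases hmax : PySem.List.max? (implicants.map pvSum) (fun y => y) with
  | none =>
    rw [PySem.List.max?_eq_none_iff] at hmax
    simp_all
  | some v =>
    have h := PySem.List.max?_isMax hmax (pvSum x) (List.mem_map_of_mem hx)
    show pvSum x < v + 1
    omega

theorem lt_pvM_exists {implicants : List (String × (List (String × Int)))} {c : Int}
    (hc0 : 0 ≤ c) (hc : c < pvM implicants) : ∃ x ∈ implicants, c ≤ pvSum x := by
  unfold pvM at hc
  cases hmax : PySem.List.max? (implicants.map pvSum) (fun y => y) with
  | none =>
    rw [hmax] at hc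
    have hc' : c < 0 := hc
    omega
  | some v =>
    rw [hmax] at hc
    have hc' : c < v + 1 := hc
    have hv := PySem.List.max?_mem hmax
    rcases List.mem_map.mp hv with ⟨x, hx, hxv⟩
    exact ⟨x, hx, by omega⟩

theorem countP_lt_succ (implicants : List (String × (List (String × Int)))) (c : Int) :
    implicants.countP (fun x => decide (pvSum x < c + 1)) =
      implicants.countP (fun x => decide (pvSum x < c)) +
      implicants.countP (fun x => pvSum x == c) := by
  induction implicants with
  | nil => simp
  | cons a l ih =>
    simp only [List.countP_cons, ih, beq_iff_eq]
    rcases lt_trichotomy (pvSum a) c with h | h | h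
    · simp [h, show pvSum a < c + 1 by omega, show ¬ pvSum a = c by omega]
      omega
    · simp [h, show (c : Int) < c + 1 by omega]
      omega
    · simp [show ¬ pvSum a < c by omega, show ¬ pvSum a < c + 1 by omega,
        show ¬ pvSum a = c by omega]

-- one unfolding of the while loop when the guard holds
theorem pvLoopA_succ (implicants : List (String × (List (String × Int)))) (endn : Int)
    (fuel : Nat) (c state : Int) (d : PySem.Dict Int (List (String × (List (String × Int)))))
    (h : state < endn) :
    pvLoopA implicants endn (fuel + 1) c state d =
      pvLoopA implicants endn fuel (c + 1)
        (state + PySem.List.len (implicants.filter (fun x => pvSum x == c)))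
        (d.insert c (implicants.filter (fun x => pvSum x == c))) := by
  rw [pvLoopA, if_pos h]

-- once the guard is false the loop returns its accumulator
theorem pvLoopA_else (implicants : List (String × (List (String × Int)))) (endn : Int)
    (fuel : Nat) (c state : Int) (d : PySem.Dict Int (List (String × (List (String × Int)))))
    (h : ¬ state < endn) :
    pvLoopA implicants endn fuel c state d = d := by
  cases fuel <;> rw [pvLoopA, if_neg h]

-- once every sum is below c the guard is false (the state has counted everything)
theorem pvLoopA_stop (implicants : List (String × (List (String × Int)))) (fuel : Nat)
    (c : Int) (d : PySem.Dict Int (List (String × (List (String × Int)))))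
    (hall : ∀ x ∈ implicants, pvSum x < c) :
    pvLoopA implicants (PySem.List.len implicants) fuel c
      (implicants.countP (fun x => decide (pvSum x < c)) : Int) d = d := by
  have hlen : implicants.countP (fun x => decide (pvSum x < c)) = implicants.length :=
    List.countP_eq_length.mpr (by intro a ha; simpa using hall a ha)
  apply pvLoopA_else
  rw [hlen, PySem.List.len_eq]
  omega

theorem pvLoopA_eq (implicants : List (String × (List (String × Int)))) :
    ∀ (fuel : Nat) (c : Int) (d : PySem.Dict Int (List (String × (List (String × Int))))),
    0 ≤ c → (pvM implicants - c).toNat ≤ fuel →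
    pvLoopA implicants (PySem.List.len implicants) fuel c
      (implicants.countP (fun x => decide (pvSum x < c)) : Int) d =
    (PySem.List.pyRange c (pvM implicants) 1).foldl
      (fun d' k => d'.insert k (implicants.filter (fun x => pvSum x == k))) d := by
  intro fuel
  induction fuel with
  | zero =>
    intro c d hc0 hfuel
    have hm : pvM implicants ≤ c := by omega
    rw [PySem.List.pyRange_one_eq_nil hm, List.foldl_nil]
    exact pvLoopA_stop _ _ _ _ (fun x hx => lt_of_lt_of_le (pvSum_lt_pvM hx) hm)
  | succ fuel ih =>
    intro c d hc0 hfuel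
    by_cases hc : c < pvM implicants
    · -- guard is true: one loop iteration
      obtain ⟨x, hx, hxc⟩ := lt_pvM_exists hc0 hc
      have hguard : implicants.countP (fun x => decide (pvSum x < c)) < implicants.length := by
        rcases Nat.lt_or_ge (implicants.countP (fun x => decide (pvSum x < c))) implicants.length with h | h
        · exact h
        · exfalso
          have := List.countP_eq_length.mp (le_antisymm List.countP_le_length h) x hx
          simp at this; omega
      rw [pvLoopA_succ _ _ _ _ _ _ (by rw [PySem.List.len_eq]; exact_mod_cast hguard)]
      have hstate : (implicants.countP (fun x => decide (pvSum x < c)) : Int) +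
          PySem.List.len (implicants.filter (fun x => pvSum x == c)) =
          (implicants.countP (fun x => decide (pvSum x < c + 1)) : Int) := by
        rw [PySem.List.len_eq,
          show (implicants.filter (fun x => pvSum x == c)).length =
            implicants.countP (fun x => pvSum x == c) from List.countP_eq_length_filter.symm,
          countP_lt_succ]
        push_cast; ring
      rw [PySem.List.pyRange_one_cons hc, List.foldl_cons, hstate]
      exact ih (c + 1) (d.insert c (implicants.filter (fun x => pvSum x == c)))
        (by omega) (by omega)
    · rw [PySem.List.pyRange_one_eq_nil (by omega), List.foldl_nil]
      exact pvLoopA_stop _ _ _ _ (fun x hx => lt_of_lt_of_le (pvSum_lt_pvM hx) (by omega))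

-- A equals the canonical grouped list
theorem sort_by_ones_canon (implicants : List (String × (List (String × Int))))
    (hpre : ∀ x ∈ implicants, 0 ≤ pvSum x) :
    sort_by_ones implicants =
      (PySem.List.pyRange 0 (pvM implicants) 1).map
        (fun k => (k, implicants.filter (fun x => pvSum x == k))) := by
  unfold sort_by_ones
  have h0 : ((implicants.countP (fun x => decide (pvSum x < 0)) : Nat) : Int) = 0 := by
    have : implicants.countP (fun x => decide (pvSum x < 0)) = 0 :=
      List.countP_eq_zero.mpr (by intro a ha; simpa using not_lt.mpr (hpre a ha))
    omega
  have hfuel : (pvM implicants - 0).toNat ≤ ((implicants.map pvSum).foldl max 0).toNat + 1 := by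
    unfold pvM
    cases hmax : PySem.List.max? (implicants.map pvSum) (fun y => y) with
    | none =>
      show ((0 : Int) - 0).toNat ≤ _
      simp
    | some v =>
      show ((v + 1 : Int) - 0).toNat ≤ _
      have hv := PySem.List.max?_mem hmax
      have := (PySem.List.le_foldl_max (implicants.map pvSum) 0).2 v hv
      omega
  have h := pvLoopA_eq implicants (((implicants.map pvSum).foldl max 0).toNat + 1) 0
    PySem.Dict.empty (by omega) hfuel
  rw [h0] at h
  rw [h]
  rw [PySem.Dict.items_foldl_insert_fresh _ (fun a => a)
    (fun a => implicants.filter (fun x => pvSum x == a)) _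
    (by intro a _; exact PySem.Dict.contains_empty a)
    (by simpa using PySem.List.nodup_pyRange_one 0 (pvM implicants))]
  simp [PySem.Dict.empty]

-- filtering the (sum, x) pairs on the first component is filtering the list on its sum
theorem zip_filter_snd (c : Int) (l : List (String × (List (String × Int)))) :
    (((l.map pvSum).zip l).filter (fun p => p.1 == c)).map (fun p => p.2) =
      l.filter (fun x => pvSum x == c) := by
  induction l with
  | nil => simp
  | cons a t ih =>
    simp only [List.map_cons, List.zip_cons_cons, List.filter_cons]
    by_cases h : pvSum a == c
    · simp [h, ih]
    · simp only [h]; simpa using ih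

-- B equals the same canonical grouped list
theorem sort_by_ones_alt_canon (implicants : List (String × (List (String × Int))))
    (hpre : ∀ x ∈ implicants, 0 ≤ pvSum x) :
    sort_by_ones_alt implicants =
      (PySem.List.pyRange 0 (pvM implicants) 1).map
        (fun k => (k, implicants.filter (fun x => pvSum x == k))) := by
  show (((implicants.map pvSum).zip implicants).foldl
      (fun d p => d.modify p.1 [] (· ++ [p.2]))
      ((PySem.List.pyRange 0 (pvM implicants) 1).foldl
        (fun d k => d.insert k ([] : List (String × (List (String × Int)))))
        PySem.Dict.empty)).items = _
  set R := PySem.List.pyRange 0 (pvM implicants) 1 with hR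
  set b0 := R.foldl (fun d k =>
      d.insert k ([] : List (String × (List (String × Int))))) PySem.Dict.empty with hb0
  have hnodupR : R.Nodup := PySem.List.nodup_pyRange_one 0 (pvM implicants)
  have hitems0 : b0.items = R.map (fun k => (k, ([] : List (String × (List (String × Int)))))) := by
    rw [hb0, PySem.Dict.items_foldl_insert_fresh R (fun a => a) (fun _ => []) _
      (by intro a _; exact PySem.Dict.contains_empty a) (by simpa using hnodupR)]
    simp [PySem.Dict.empty]
  have hkeys0 : b0.keys = R := by
    simp [PySem.Dict.keys, hitems0, List.map_map, Function.comp_def]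
  set F := ((implicants.map pvSum).zip implicants).foldl
      (fun d p => d.modify p.1 [] (· ++ [p.2])) b0 with hF
  have hkeysF : F.keys = R := by
    have h1 : F.keys = PySem.Set.update b0.keys
        (((implicants.map pvSum).zip implicants).map (fun p => p.1)) := by
      rw [hF]
      exact PySem.Dict.keys_foldl_modify_key _
        (fun p : Int × (String × (List (String × Int))) => p.1) _
        (fun _ (p : Int × (String × (List (String × Int)))) v => v ++ [p.2]) b0
    rw [h1, hkeys0]
    have hmapfst : (((implicants.map pvSum).zip implicants).map (fun p => p.1)) =
        implicants.map pvSum := by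
      exact List.map_fst_zip (l₁ := implicants.map pvSum) (l₂ := implicants) (by simp)
    rw [hmapfst, PySem.Set.update_eq_append_filter]
    have hnil : (PySem.Set.ofList (implicants.map pvSum)).filter
        (fun y => !PySem.Set.contains R y) = [] := by
      rw [List.filter_eq_nil_iff]
      intro y hy
      have hy' : y ∈ implicants.map pvSum := (PySem.Set.mem_ofList _ _).mp hy
      rcases List.mem_map.mp hy' with ⟨x, hx, rfl⟩
      have h1 : 0 ≤ pvSum x := hpre x hx
      have h2 : pvSum x < pvM implicants := pvSum_lt_pvM hx
      have hmem : pvSum x ∈ R := PySem.List.mem_pyRange_one.mpr ⟨h1, h2⟩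
      simp [hmem]
    rw [hnil, List.append_nil]
  have hgetD : ∀ k ∈ R, F.getD k [] = implicants.filter (fun x => pvSum x == k) := by
    intro k hk
    rw [hF, PySem.Dict.getD_foldl_modify_append]
    have h0 : b0.getD k [] = [] := by
      apply PySem.Dict.getD_of_mem_items b0 (v := []) _ (by rw [hkeys0]; exact hnodupR)
      rw [hitems0]
      exact List.mem_map.mpr ⟨k, hk, rfl⟩
    rw [h0, List.nil_append, zip_filter_snd]
  calc F.items = F.keys.map (fun k => (k, F.getD k [])) :=
        PySem.Dict.items_eq_map_keys F (by rw [hkeysF]; exact hnodupR) []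
    _ = R.map (fun k => (k, F.getD k [])) := by rw [hkeysF]
    _ = R.map (fun k => (k, implicants.filter (fun x => pvSum x == k))) :=
        List.map_congr_left (fun k hk => by rw [hgetD k hk])

-- ===== VERDICT (by name: the statement is the Claim_ definition above) =====
theorem sort_by_ones_spec : Claim_equal_sort_by_ones := by
  intro implicants _ hpre
  unfold Spec_sort_by_ones
  rw [sort_by_ones_canon implicants hpre, sort_by_ones_alt_canon implicants hpre]
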